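-- pv_equiv track=rewrite | github.com/manojadhikari/Programming-Challenges | search-problems/sum_swap.py | sum_swap
-- ===== SOURCE A (Python) =====
-- def exists(target, arr):
--  start = -1
--  end = len(arr)
--
--  while start + 1 < end:
--    mid = (start + end) // 2
--    if arr[mid] == target:
--      return True
--    elif(arr[mid] < target):
--      start = mid
--    else:
--      end = mid
--  return False
--
-- def sum_swap(arr1, arr2):
--  sum1 = sum(arr1)
--  sum2 = sum(arr2)
--
--  if(sum1%2 != sum2%2):
--    return None
--  mid = (sum1 + sum2) // 2
--  arr2.sort()
--
--  for num1 in arr1: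
--    target = mid - (sum1 - num1)
--    if exists(target, arr2):
--      return (num1, target)
--
--  return None
-- ===== SOURCE B (Python) =====
-- def sum_swap(arr1, arr2):
--     sum1 = sum(arr1)
--     sum2 = sum(arr2)
--     if (sum1 - sum2) % 2 != 0:
--         return None
--     delta = (sum1 - sum2) // 2
--     s2 = set(arr2)
--     for num1 in arr1:
--         target = num1 - delta
--         if target in s2:
--             return (num1, target)
--     return None
-- ===== Notes on version B (the rewrite author's own statement) =====
-- stated objective: alternative
-- what changed: B replaces A's sort-then-binary-search-per-element with a hash set of arr2 built once and direct membership lookups, using the difference (sum1-sum2)//2 instead of the midpoint of the combined sum.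
import Mathlib
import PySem

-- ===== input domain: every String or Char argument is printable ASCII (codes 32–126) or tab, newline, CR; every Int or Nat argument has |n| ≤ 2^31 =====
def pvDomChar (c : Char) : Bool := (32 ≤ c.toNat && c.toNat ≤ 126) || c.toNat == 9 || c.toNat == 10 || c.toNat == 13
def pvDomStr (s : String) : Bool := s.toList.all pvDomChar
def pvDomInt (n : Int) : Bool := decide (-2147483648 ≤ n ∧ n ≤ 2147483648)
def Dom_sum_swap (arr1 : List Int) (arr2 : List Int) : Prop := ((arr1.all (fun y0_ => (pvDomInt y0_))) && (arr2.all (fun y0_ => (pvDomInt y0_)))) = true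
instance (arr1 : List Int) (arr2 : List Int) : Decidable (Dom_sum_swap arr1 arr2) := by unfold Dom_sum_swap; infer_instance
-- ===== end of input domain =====

-- B replaces A's sort-arr2-then-binary-search-per-element with a set of arr2 built once and
-- direct membership lookups; equivalence is about the RETURN value only — Python A sorts
-- arr2 in place, B does not mutate its arguments.

-- ===== PORT A =====
-- the while-loop of A's `exists` (binary search); `none` from pyGet? cannot occur (index stays in range)
def pyExistsLoop (target : Int) (arr : List Int) (start e : Int) : Bool :=
  if _h : start + 1 < e then
    let mid := PySem.Int.floordiv (start + e) 2
    match PySem.List.pyGet? arr mid with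
    | none => false
    | some v =>
      if v = target then true
      else if v < target then pyExistsLoop target arr mid e
      else pyExistsLoop target arr start mid
  else false
termination_by (e - start).toNat
decreasing_by
  · have hb := PySem.Int.floordiv_two_mid_bounds (lo := start + 1) (hi := e - 1) (by omega)
    have hcast : start + 1 + (e - 1) = start + e := by ring
    rw [hcast] at hb
    omega
  · have hb := PySem.Int.floordiv_two_mid_bounds (lo := start + 1) (hi := e - 1) (by omega)
    have hcast : start + 1 + (e - 1) = start + e := by ring
    rw [hcast] at hb
    omega

def pyExists (target : Int) (arr : List Int) : Bool :=
  pyExistsLoop target arr (-1) arr.length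

-- A's for-loop over arr1 with early return
def sumSwapLoopA (sum1 mid : Int) (a2 : List Int) : List Int → Option (Int × Int)
  | [] => none
  | n :: rest =>
    let target := mid - (sum1 - n)
    if pyExists target a2 then some (n, target) else sumSwapLoopA sum1 mid a2 rest

def sum_swap (arr1 : List Int) (arr2 : List Int) : Option (Int × Int) :=
  let sum1 := arr1.sum
  let sum2 := arr2.sum
  if PySem.Int.mod sum1 2 ≠ PySem.Int.mod sum2 2 then none
  else
    let mid := PySem.Int.floordiv (sum1 + sum2) 2
    let a2 := PySem.List.sorted arr2 (fun x => x) false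
    sumSwapLoopA sum1 mid a2 arr1

-- ===== PORT B =====
-- B's for-loop over arr1 with early return, looking targets up in the set of arr2
def sumSwapLoopB (delta : Int) (s2 : PySem.Set Int) : List Int → Option (Int × Int)
  | [] => none
  | n :: rest =>
    let target := n - delta
    if PySem.Set.contains s2 target then some (n, target) else sumSwapLoopB delta s2 rest

def sum_swap_alt (arr1 : List Int) (arr2 : List Int) : Option (Int × Int) :=
  let sum1 := arr1.sum
  let sum2 := arr2.sum
  if PySem.Int.mod (sum1 - sum2) 2 ≠ 0 then none
  else
    let delta := PySem.Int.floordiv (sum1 - sum2) 2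
    let s2 := PySem.Set.ofList arr2
    sumSwapLoopB delta s2 arr1

-- ===== PRECONDITION & SPEC =====
def Spec_sum_swap (arr1 : List Int) (arr2 : List Int) (out : Option (Int × Int)) : Prop := out = sum_swap_alt arr1 arr2
instance (arr1 : List Int) (arr2 : List Int) (out : Option (Int × Int)) : Decidable (Spec_sum_swap arr1 arr2 out) := by unfold Spec_sum_swap; infer_instance

-- ===== CLAIM (what is proved, stated in full; the proofs are below) =====
def Claim_equal_sum_swap : Prop := ∀ (arr1 : List Int) (arr2 : List Int), Dom_sum_swap arr1 arr2 → Spec_sum_swap arr1 arr2 (sum_swap arr1 arr2)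

-- ===== LEMMAS AND PROOFS =====

-- base case of the search: when the window is empty and everything outside it avoids t, t ∉ xs
lemma not_mem_of_window_closed (t : Int) (xs : List Int) (s e : Int) (he : e ≤ s + 1)
    (hlo : ∀ (j : Nat) (hj : j < xs.length), (j : Int) ≤ s → xs[j] < t)
    (hhi : ∀ (j : Nat) (hj : j < xs.length), e ≤ (j : Int) → t < xs[j]) :
    t ∉ xs := by
  intro hmem
  obtain ⟨j, hj, hje⟩ := List.mem_iff_getElem.mp hmem
  by_cases hc : (j : Int) ≤ s
  · exact absurd hje (by have := hlo j hj hc; omega)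
  · exact absurd hje (by have := hhi j hj (by omega); omega)

lemma pyExistsLoop_eq_mem (t : Int) (xs : List Int) (hp : xs.Pairwise (· ≤ ·)) :
    ∀ (n : Nat) (s e : Int), (e - s).toNat ≤ n → -1 ≤ s → e ≤ xs.length →
    (∀ (j : Nat) (hj : j < xs.length), (j : Int) ≤ s → xs[j] < t) →
    (∀ (j : Nat) (hj : j < xs.length), e ≤ (j : Int) → t < xs[j]) →
    pyExistsLoop t xs s e = decide (t ∈ xs) := by
  intro n
  induction n with
  | zero =>
    intro s e hn hs he hlo hhi
    rw [pyExistsLoop]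
    have hse : ¬ s + 1 < e := by omega
    simp only [hse, dite_false]
    exact (decide_eq_false (not_mem_of_window_closed t xs s e (by omega) hlo hhi)).symm
  | succ m ih =>
    intro s e hn hs he hlo hhi
    rw [pyExistsLoop]
    by_cases hse : s + 1 < e
    · simp only [hse, dite_true]
      have hb := PySem.Int.floordiv_two_mid_bounds (lo := s + 1) (hi := e - 1) (by omega)
      have hcast : s + 1 + (e - 1) = s + e := by ring
      rw [hcast] at hb
      set mid := PySem.Int.floordiv (s + e) 2 with hmid
      have hmid0 : 0 ≤ mid := by omega
      have hmidlt : mid < xs.length := by omega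
      have hmidnat : (mid.toNat : Int) = mid := Int.toNat_of_nonneg hmid0
      have hget : PySem.List.pyGet? xs mid = some xs[mid.toNat] := by
        rw [PySem.List.pyGet?_of_nonneg]
        · exact List.getElem?_eq_getElem (by omega)
        · exact hmid0
      rw [hget]
      have hpg := List.pairwise_iff_getElem.mp hp
      by_cases heq : xs[mid.toNat] = t
      · simp only [heq, if_true]
        exact (decide_eq_true (heq ▸ List.getElem_mem _)).symm
      · simp only [heq, if_false]
        by_cases hlt : xs[mid.toNat] < t
        · simp only [hlt, if_true]
          apply ih mid e (by omega) (by omega) he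
          · intro j hj hjm
            rcases Nat.lt_or_ge j mid.toNat with hc | hc
            · exact lt_of_le_of_lt (hpg j mid.toNat hj (by omega) hc) hlt
            · have : j = mid.toNat := by omega
              subst this; exact hlt
          · exact hhi
        · simp only [hlt, if_false]
          have htv : t < xs[mid.toNat] := by omega
          apply ih s mid (by omega) hs (by omega) hlo
          intro j hj hjm
          rcases Nat.lt_or_ge mid.toNat j with hc | hc
          · exact lt_of_lt_of_le htv (hpg mid.toNat j (by omega) hj hc)
          · have : j = mid.toNat := by omega
            subst this; exact htv
    · simp only [hse, dite_false]
      exact (decide_eq_false (not_mem_of_window_closed t xs s e (by omega) hlo hhi)).symm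

lemma pyExists_sorted_eq (t : Int) (arr2 : List Int) :
    pyExists t (PySem.List.sorted arr2 (fun x => x) false)
      = PySem.Set.contains (PySem.Set.ofList arr2) t := by
  have hp : (PySem.List.sorted arr2 (fun x => x) false).Pairwise (· ≤ ·) :=
    PySem.List.sorted_pairwise arr2 (fun x => x)
  have h1 : pyExists t (PySem.List.sorted arr2 (fun x => x) false)
      = decide (t ∈ PySem.List.sorted arr2 (fun x => x) false) := by
    apply pyExistsLoop_eq_mem t _ hp ((PySem.List.sorted arr2 (fun x => x) false).length + 1)
    · omega
    · omega
    · omega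
    · intro j hj hjm; omega
    · intro j hj hjm; omega
  rw [h1]
  by_cases hm : t ∈ arr2
  · rw [decide_eq_true (by rwa [PySem.List.mem_sorted]),
      (PySem.Set.contains_iff _ _).mpr ((PySem.Set.mem_ofList _ _).mpr hm)]
  · rw [decide_eq_false (by rwa [PySem.List.mem_sorted])]
    rcases h : PySem.Set.contains (PySem.Set.ofList arr2) t with _ | _
    · rfl
    · exact absurd ((PySem.Set.mem_ofList _ _).mp ((PySem.Set.contains_iff _ _).mp h)) hm

lemma loops_eq (sum1 mid delta : Int) (arr2 : List Int)
    (htarget : ∀ n : Int, mid - (sum1 - n) = n - delta) :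
    ∀ l : List Int,
      sumSwapLoopA sum1 mid (PySem.List.sorted arr2 (fun x => x) false) l
        = sumSwapLoopB delta (PySem.Set.ofList arr2) l := by
  intro l
  induction l with
  | nil => rfl
  | cons n rest ihl =>
    simp only [sumSwapLoopA, sumSwapLoopB, htarget n, pyExists_sorted_eq]
    split <;> simp [ihl]

-- ===== VERDICT (by name: the statement is the Claim_ definition above) =====
theorem sum_swap_spec : Claim_equal_sum_swap := by
  intro arr1 arr2 _
  unfold Spec_sum_swap sum_swap sum_swap_alt
  set s1 := arr1.sum
  set s2 := arr2.sum
  have hm1 : PySem.Int.mod s1 2 = s1 % 2 := PySem.Int.mod_eq_emod_of_pos (by omega)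
  have hm2 : PySem.Int.mod s2 2 = s2 % 2 := PySem.Int.mod_eq_emod_of_pos (by omega)
  have hmd : PySem.Int.mod (s1 - s2) 2 = (s1 - s2) % 2 := PySem.Int.mod_eq_emod_of_pos (by omega)
  by_cases hpar : PySem.Int.mod s1 2 = PySem.Int.mod s2 2
  · have hdvd : (2 : Int) ∣ (s1 - s2) := by
      rw [hm1, hm2] at hpar; omega
    have hpar' : ¬ PySem.Int.mod (s1 - s2) 2 ≠ 0 := by
      rw [hmd]; simp only [ne_eq, not_not]; omega
    simp only [hpar, hpar', ne_eq, not_true, if_false]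
    apply loops_eq
    intro n
    obtain ⟨k, hk⟩ := hdvd
    have hfd1 : PySem.Int.floordiv (s1 + s2) 2 = s2 + k := by
      rw [PySem.Int.floordiv_eq_ediv_of_pos (by omega)]; omega
    have hfd2 : PySem.Int.floordiv (s1 - s2) 2 = k := by
      rw [PySem.Int.floordiv_eq_ediv_of_pos (by omega)]; omega
    rw [hfd1, hfd2]; omega
  · have hpar' : PySem.Int.mod (s1 - s2) 2 ≠ 0 := by
      rw [hm1, hm2] at hpar; rw [hmd]; omega
    rw [if_pos hpar, if_pos hpar']
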